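-- pv_equiv track=rewrite | github.com/sticky-ai/Algorithms | arcade/the_core/swapDiagonals.py | swapDiagonals
-- ===== SOURCE A (Python) =====
-- def swapDiagonals(matrix):
--     d1 = [matrix[i][i] for i in range(len(matrix))]
--     d2 = []
--     for i in range(len(matrix)):
--         j = len(matrix) - i - 1
--         d2.append(matrix[i][j])
--
--     for i in range(len(matrix) - 1, -1, -1):
--         matrix[i][i] = d2[i]
--
--     for i in range(len(matrix)):
--         j = len(matrix) - i - 1
--         matrix[i][j] = d1[i]
--
--     return matrix
-- ===== SOURCE B (Python) =====
-- def swapDiagonals(matrix):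
--     n = len(matrix)
--     for i in range(n):
--         j = n - 1 - i
--         matrix[i][i], matrix[i][j] = matrix[i][j], matrix[i][i]
--     return matrix
-- ===== Notes on version B (the rewrite author's own statement) =====
-- stated objective: simpler
-- what changed: A single in-place pass swapping matrix[i][i] with matrix[i][n-1-i] replaces A's construction of both diagonal lists followed by two separate write-back loops (one reversed); Pre_ only excludes ragged matrices whose rows are too short for the diagonal indices, where A raises IndexError.
import Mathlib
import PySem

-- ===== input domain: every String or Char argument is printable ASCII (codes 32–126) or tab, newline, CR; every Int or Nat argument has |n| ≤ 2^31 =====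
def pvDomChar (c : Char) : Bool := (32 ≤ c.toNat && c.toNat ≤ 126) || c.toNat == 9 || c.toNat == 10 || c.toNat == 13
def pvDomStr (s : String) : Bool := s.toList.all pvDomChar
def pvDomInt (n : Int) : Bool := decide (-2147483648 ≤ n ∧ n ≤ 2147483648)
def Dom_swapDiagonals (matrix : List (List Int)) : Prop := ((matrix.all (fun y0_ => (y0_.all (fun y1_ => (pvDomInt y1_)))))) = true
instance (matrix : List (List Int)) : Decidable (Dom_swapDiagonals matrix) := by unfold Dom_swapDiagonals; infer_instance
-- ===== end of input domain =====

-- B replaces A's "build both diagonal lists, then two write-back loops" with one pass of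
-- local swaps per row (objective: simpler). Both Pythons mutate the argument in place in the
-- same way; the proved equivalence is about the returned value.

-- ===== PORT A =====
-- write matrix[i][j] := v (no-op out of range; Python raises there, excluded by Pre_)
def pvSetCell (m : List (List Int)) (i j : Nat) (v : Int) : List (List Int) :=
  m.set i ((m.getD i []).set j v)

-- literal transliteration of A: d1, d2 read from the original matrix, then the reversed
-- write loop for the main diagonal, then the write loop for the anti-diagonal.
def swapDiagonals (matrix : List (List Int)) : List (List Int) :=
  let n := matrix.length
  let d1 := (List.range n).map (fun i => (matrix.getD i []).getD i 0)
  let d2 := (List.range n).map (fun i => (matrix.getD i []).getD (n - 1 - i) 0)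
  let m1 := ((List.range n).reverse).foldl (fun m i => pvSetCell m i i (d2.getD i 0)) matrix
  (List.range n).foldl (fun m i => pvSetCell m i (n - 1 - i) (d1.getD i 0)) m1

-- ===== PORT B =====
-- literal transliteration of Source B: one pass, swap row[i] and row[n-1-i] in row i.
def swapDiagonals_alt (matrix : List (List Int)) : List (List Int) :=
  let n := matrix.length
  (List.range n).foldl
    (fun m i =>
      let j := n - 1 - i
      let row := m.getD i []
      m.set i ((row.set i (row.getD j 0)).set j (row.getD i 0)))
    matrix

-- ===== PRECONDITION & SPEC =====
-- Pre_ excludes exactly the ragged matrices on which Python A raises IndexError: some row i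
-- is too short for index i or for index len(matrix)-1-i.
def Pre_swapDiagonals (matrix : List (List Int)) : Prop :=
  ∀ i ∈ List.range matrix.length,
    i < (matrix.getD i []).length ∧ matrix.length - 1 - i < (matrix.getD i []).length
instance (matrix : List (List Int)) : Decidable (Pre_swapDiagonals matrix) := by
  unfold Pre_swapDiagonals; infer_instance

def pvWitness_swapDiagonals : List (List Int) := [[1, 2], [3, 4]]

def Spec_swapDiagonals (matrix : List (List Int)) (out : List (List Int)) : Prop := out = swapDiagonals_alt matrix
instance (matrix : List (List Int)) (out : List (List Int)) : Decidable (Spec_swapDiagonals matrix out) := by unfold Spec_swapDiagonals; infer_instance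

-- ===== CLAIM (what is proved, stated in full; the proofs are below) =====
def Claim_equal_swapDiagonals : Prop := ∀ (matrix : List (List Int)), Dom_swapDiagonals matrix → Pre_swapDiagonals matrix → Spec_swapDiagonals matrix (swapDiagonals matrix)

-- ===== LEMMAS AND PROOFS =====

-- Generic shape of both programs' loops: each step rewrites row i as a function of itself.
def pvUpdRow (F : Nat → List Int → List Int) (m : List (List Int)) (i : Nat) : List (List Int) :=
  m.set i (F i (m.getD i []))

theorem length_foldl_updRow (F : Nat → List Int → List Int) (L : List Nat)
    (m : List (List Int)) : (L.foldl (pvUpdRow F) m).length = m.length := by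
  induction L generalizing m with
  | nil => rfl
  | cons i L ih => simp [List.foldl, pvUpdRow, ih]

theorem getD_set_row (m : List (List Int)) (i k : Nat) (r : List Int) :
    (m.set i r).getD k [] = if k = i ∧ k < m.length then r else m.getD k [] := by
  by_cases hki : k = i
  · subst hki
    by_cases hk : k < m.length
    · simp [List.getD, hk]
    · simp [List.getD, hk]
  · have h2 : i ≠ k := fun e => hki e.symm
    simp [List.getD, hki, h2]

theorem getD_foldl_updRow (F : Nat → List Int → List Int) (L : List Nat) (hL : L.Nodup)
    (m : List (List Int)) (k : Nat) :
    (L.foldl (pvUpdRow F) m).getD k [] =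
      if k ∈ L ∧ k < m.length then F k (m.getD k []) else m.getD k [] := by
  induction L generalizing m with
  | nil => simp
  | cons i L ih =>
    rcases List.nodup_cons.mp hL with ⟨hni, hnd⟩
    rw [List.foldl_cons, ih hnd]
    simp only [pvUpdRow, List.length_set, getD_set_row]
    by_cases hkL : k ∈ L
    · have hki : k ≠ i := fun e => hni (e ▸ hkL)
      by_cases hk : k < m.length
      · simp [hkL, hk, hki, List.mem_cons]
      · simp [hkL, hk, hki]
    · by_cases hki : k = i
      · subst hki
        by_cases hk : k < m.length <;> simp [hkL, hk]
      · simp [hkL, hki]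

theorem getD_map_range (g : Nat → Int) (n k : Nat) (hk : k < n) :
    ((List.range n).map g).getD k 0 = g k := by
  rw [List.getD, List.getElem?_map, List.getElem?_range hk]; rfl

-- the heart: A's three passes and B's single pass produce the same rows
theorem pv_key (matrix : List (List Int)) (n : Nat) (hn : n = matrix.length) (d1 d2 : List Int)
    (hv1 : ∀ k, k < n → d1.getD k 0 = (matrix.getD k []).getD k 0)
    (hv2 : ∀ k, k < n → d2.getD k 0 = (matrix.getD k []).getD (n - 1 - k) 0) :
    (List.range n).foldl (pvUpdRow (fun i r => r.set (n - 1 - i) (d1.getD i 0)))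
      (((List.range n).reverse).foldl (pvUpdRow (fun i r => r.set i (d2.getD i 0))) matrix)
    = (List.range n).foldl
        (pvUpdRow (fun i r => (r.set i (r.getD (n - 1 - i) 0)).set (n - 1 - i) (r.getD i 0)))
        matrix := by
  set m1 := ((List.range n).reverse).foldl (pvUpdRow (fun i r => r.set i (d2.getD i 0))) matrix with hm1
  have hlen1 : m1.length = matrix.length := length_foldl_updRow _ _ _
  have hlenA : ((List.range n).foldl (pvUpdRow (fun i r => r.set (n - 1 - i) (d1.getD i 0))) m1).length = matrix.length := by
    rw [length_foldl_updRow, hlen1]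
  have hlenB : ((List.range n).foldl
      (pvUpdRow (fun i r => (r.set i (r.getD (n - 1 - i) 0)).set (n - 1 - i) (r.getD i 0))) matrix).length = matrix.length :=
    length_foldl_updRow _ _ _
  apply List.ext_getElem?
  intro k
  rcases Nat.lt_or_ge k matrix.length with hk | hk
  · have hkn : k < n := hn ▸ hk
    have hmem : k ∈ List.range n := List.mem_range.mpr hkn
    have hmemr : k ∈ (List.range n).reverse := by simpa using hmem
    have h1 : m1.getD k [] = (matrix.getD k []).set k (d2.getD k 0) := by
      rw [hm1, getD_foldl_updRow _ _ (by simpa using List.nodup_range (n := n)) _ k,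
        if_pos ⟨hmemr, hk⟩]
    have hA : ((List.range n).foldl (pvUpdRow (fun i r => r.set (n - 1 - i) (d1.getD i 0))) m1).getD k [] =
        ((matrix.getD k []).set k (d2.getD k 0)).set (n - 1 - k) (d1.getD k 0) := by
      rw [getD_foldl_updRow _ _ List.nodup_range _ k,
        if_pos ⟨hmem, by rw [hlen1]; exact hk⟩, h1]
    have hB : ((List.range n).foldl
        (pvUpdRow (fun i r => (r.set i (r.getD (n - 1 - i) 0)).set (n - 1 - i) (r.getD i 0))) matrix).getD k [] =
        ((matrix.getD k []).set k ((matrix.getD k []).getD (n - 1 - k) 0)).set (n - 1 - k) ((matrix.getD k []).getD k 0) := by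
      rw [getD_foldl_updRow _ _ List.nodup_range _ k, if_pos ⟨hmem, hk⟩]
    have heq : ((List.range n).foldl (pvUpdRow (fun i r => r.set (n - 1 - i) (d1.getD i 0))) m1).getD k [] =
        ((List.range n).foldl
          (pvUpdRow (fun i r => (r.set i (r.getD (n - 1 - i) 0)).set (n - 1 - i) (r.getD i 0))) matrix).getD k [] := by
      rw [hA, hB, hv1 k hkn, hv2 k hkn]
    rw [List.getD, List.getD, List.getElem?_eq_getElem (by omega), List.getElem?_eq_getElem (by omega),
      Option.getD_some, Option.getD_some] at heq
    rw [List.getElem?_eq_getElem (by omega), List.getElem?_eq_getElem (by omega), heq]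
  · rw [List.getElem?_eq_none (by omega), List.getElem?_eq_none (by omega)]

-- ===== VERDICT (by name: the statement is the Claim_ definition above) =====
theorem swapDiagonals_spec : Claim_equal_swapDiagonals := by
  intro matrix _ _
  show swapDiagonals matrix = swapDiagonals_alt matrix
  exact pv_key matrix matrix.length rfl
    ((List.range matrix.length).map (fun i => (matrix.getD i []).getD i 0))
    ((List.range matrix.length).map (fun i => (matrix.getD i []).getD (matrix.length - 1 - i) 0))
    (fun k hk => getD_map_range _ _ k hk) (fun k hk => getD_map_range _ _ k hk)
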